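-- pv_equiv track=rewrite | github.com/luchomame/SentimentAnalysisFinal | Sentiment_Analysis-masterCole/Sentiment_Analysis-master/ml/php/testSent.py | linearGraph
-- ===== SOURCE A (Python) =====
-- def linearGraph(labels, posINCREMENT, negINCREMENT):
--     # we're going to use the positive and negative labels received from the classifier
--     xar = []
--     yar = []
--     x = 0
--     y = 0
--     for label in labels:
--         x += 1
--         # npl dates if you wanna make it date graph
--         if label == "pos":
--             y += posINCREMENT
--         elif label == 'neg':
--             # negative bias? make a negative count as half
--             y -= negINCREMENT
--         xar.append(x)
--         yar.append(y)
--
--     return xar, yar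
-- ===== SOURCE B (Python) =====
-- from itertools import accumulate
--
-- def linearGraph(labels, posINCREMENT, negINCREMENT):
--     # x-axis: just 1..n
--     xar = list(range(1, len(labels) + 1))
--     # instead of accumulating the score, keep prefix COUNTS of pos/neg labels
--     pos_counts = list(accumulate(1 if l == "pos" else 0 for l in labels))
--     neg_counts = list(accumulate(1 if l == "neg" else 0 for l in labels))
--     # the score at step i is a linear combination of the two counts
--     yar = [posINCREMENT * p - negINCREMENT * n
--            for p, n in zip(pos_counts, neg_counts)]
--     return xar, yar
-- ===== Notes on version B (the rewrite author's own statement) =====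
-- stated objective: alternative
-- what changed: B never accumulates the score: it builds prefix counts of 'pos' and 'neg' labels (two accumulate passes) and reconstructs each y as the linear combination posINCREMENT*#pos - negINCREMENT*#neg, with the x-axis as a plain range.
import Mathlib
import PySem

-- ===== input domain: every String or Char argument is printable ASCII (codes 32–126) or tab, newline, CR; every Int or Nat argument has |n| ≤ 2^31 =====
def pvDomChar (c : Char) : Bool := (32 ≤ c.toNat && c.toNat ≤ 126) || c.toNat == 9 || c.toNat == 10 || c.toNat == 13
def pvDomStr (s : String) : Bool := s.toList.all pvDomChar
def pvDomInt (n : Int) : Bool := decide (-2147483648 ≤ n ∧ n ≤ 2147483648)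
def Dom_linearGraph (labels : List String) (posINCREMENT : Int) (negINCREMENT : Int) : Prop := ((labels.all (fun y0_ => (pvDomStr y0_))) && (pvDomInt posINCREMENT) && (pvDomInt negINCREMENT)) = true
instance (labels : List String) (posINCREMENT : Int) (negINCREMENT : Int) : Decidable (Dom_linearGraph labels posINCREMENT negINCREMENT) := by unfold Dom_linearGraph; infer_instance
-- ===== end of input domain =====

-- B never accumulates the score: it builds prefix counts of "pos"/"neg" and reconstructs each y
-- as posINCREMENT*#pos - negINCREMENT*#neg (alternative decomposition; same cost).

-- ===== PORT A =====
-- state (x, y, xar, yar), appended to exactly as the Python loop does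
def linearGraph (labels : List String) (posINCREMENT : Int) (negINCREMENT : Int) : List Int × List Int :=
  let s := labels.foldl
    (fun (st : Int × Int × List Int × List Int) label =>
      let x := st.1 + 1
      let y := if label == "pos" then st.2.1 + posINCREMENT
               else if label == "neg" then st.2.1 - negINCREMENT
               else st.2.1
      (x, y, st.2.2.1 ++ [x], st.2.2.2 ++ [y]))
    (0, 0, [], [])
  (s.2.2.1, s.2.2.2)

-- ===== PORT B =====
-- port of itertools.accumulate (default operator.add)
def pvAccumulate (acc : Int) : List Int → List Int
  | [] => []
  | i :: rest => (acc + i) :: pvAccumulate (acc + i) rest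

def linearGraph_alt (labels : List String) (posINCREMENT : Int) (negINCREMENT : Int) : List Int × List Int :=
  let posCounts := pvAccumulate 0 (labels.map (fun l => if l == "pos" then (1 : Int) else 0))
  let negCounts := pvAccumulate 0 (labels.map (fun l => if l == "neg" then (1 : Int) else 0))
  (PySem.List.pyRange 1 ((labels.length : Int) + 1) 1,
   List.zipWith (fun p n => posINCREMENT * p - negINCREMENT * n) posCounts negCounts)

-- ===== PRECONDITION & SPEC =====
def Spec_linearGraph (labels : List String) (posINCREMENT : Int) (negINCREMENT : Int) (out : List Int × List Int) : Prop := out = linearGraph_alt labels posINCREMENT negINCREMENT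
instance (labels : List String) (posINCREMENT : Int) (negINCREMENT : Int) (out : List Int × List Int) : Decidable (Spec_linearGraph labels posINCREMENT negINCREMENT out) := by unfold Spec_linearGraph; infer_instance

-- ===== CLAIM (what is proved, stated in full; the proofs are below) =====
def Claim_equal_linearGraph : Prop := ∀ (labels : List String) (posINCREMENT : Int) (negINCREMENT : Int), Dom_linearGraph labels posINCREMENT negINCREMENT → Spec_linearGraph labels posINCREMENT negINCREMENT (linearGraph labels posINCREMENT negINCREMENT)

-- ===== LEMMAS AND PROOFS =====

-- A's loop, generalized over its state, characterized via pvAccumulate of per-label deltas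
theorem linearGraph_loop (posI negI : Int) :
    ∀ (labels : List String) (x y : Int) (xar yar : List Int),
      labels.foldl
        (fun (st : Int × Int × List Int × List Int) label =>
          let x := st.1 + 1
          let y := if label == "pos" then st.2.1 + posI
                   else if label == "neg" then st.2.1 - negI
                   else st.2.1
          (x, y, st.2.2.1 ++ [x], st.2.2.2 ++ [y]))
        (x, y, xar, yar)
      = (x + labels.length,
         y + (labels.map (fun l => if l == "pos" then posI else if l == "neg" then -negI else 0)).sum,
         xar ++ PySem.List.pyRange (x + 1) (x + 1 + labels.length) 1,
         yar ++ pvAccumulate y (labels.map (fun l => if l == "pos" then posI else if l == "neg" then -negI else 0))) := by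
  intro labels
  induction labels with
  | nil =>
    intro x y xar yar
    simp [pvAccumulate]
  | cons l rest ih =>
    intro x y xar yar
    simp only [List.foldl_cons, List.map_cons, List.sum_cons, pvAccumulate]
    rw [ih]
    have hrange : PySem.List.pyRange (x + 1) (x + 1 + ((l :: rest).length : Int)) 1
        = (x + 1) :: PySem.List.pyRange (x + 1 + 1) (x + 1 + ((l :: rest).length : Int)) 1 := by
      apply PySem.List.pyRange_one_cons
      simp only [List.length_cons]
      push_cast
      omega
    refine Prod.ext ?_ (Prod.ext ?_ (Prod.ext ?_ ?_))
    · simp only [List.length_cons]; push_cast; ring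
    · simp only
      have hinc : (if l = "pos" then y + posI else if l = "neg" then y - negI else y)
          = y + (if l = "pos" then posI else if l = "neg" then -negI else 0) := by
        split_ifs <;> ring
      simp only [beq_iff_eq, hinc]; ring
    · simp only [hrange]
      have harg : x + 1 + 1 + ((rest.length : Int)) = x + 1 + ((l :: rest).length : Int) := by
        simp only [List.length_cons]; push_cast; ring
      rw [harg]
      simp
    · simp only [beq_iff_eq]
      have hinc : (if l = "pos" then y + posI else if l = "neg" then y - negI else y)
          = y + (if l = "pos" then posI else if l = "neg" then -negI else 0) := by
        split_ifs <;> ring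
      simp [hinc]

-- accumulated deltas = linear combination of accumulated pos/neg counts
theorem accumulate_delta_eq_counts (P N : Int) :
    ∀ (labels : List String) (cp cn : Int),
      pvAccumulate (P * cp - N * cn)
        (labels.map (fun l => if l == "pos" then P else if l == "neg" then -N else 0))
      = List.zipWith (fun p n => P * p - N * n)
          (pvAccumulate cp (labels.map (fun l => if l == "pos" then (1 : Int) else 0)))
          (pvAccumulate cn (labels.map (fun l => if l == "neg" then (1 : Int) else 0))) := by
  intro labels
  induction labels with
  | nil => intro cp cn; simp [pvAccumulate]
  | cons l rest ih =>
    intro cp cn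
    simp only [List.map_cons, pvAccumulate, List.zipWith_cons_cons]
    have hhead : P * cp - N * cn + (if l == "pos" then P else if l == "neg" then -N else 0)
        = P * (cp + (if l == "pos" then (1 : Int) else 0))
          - N * (cn + (if l == "neg" then (1 : Int) else 0)) := by
      by_cases h : l = "pos" <;> by_cases h2 : l = "neg" <;> simp [h, h2] <;> ring
    rw [hhead, ih]

-- ===== VERDICT (by name: the statement is the Claim_ definition above) =====
theorem linearGraph_spec : Claim_equal_linearGraph := by
  intro labels posI negI _
  unfold Spec_linearGraph linearGraph linearGraph_alt
  simp only
  rw [linearGraph_loop]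
  have h0 : (0 : Int) = posI * 0 - negI * 0 := by ring
  have hacc := accumulate_delta_eq_counts posI negI labels 0 0
  rw [h0.symm] at hacc
  have h : (0 : Int) + 1 + (labels.length : Int) = (labels.length : Int) + 1 := by ring
  simp only [List.nil_append]
  rw [h, hacc]
  norm_num
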